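-- pv_equiv track=rewrite | github.com/adilido99/introCompSec | task5/main.py | encrypt_xor_with_changing_key_by_prev_cipher
-- ===== SOURCE A (Python) =====
-- def encrypt_xor_with_changing_key_by_prev_cipher(text, key, param):
--     """
--     >>> encrypt_xor_with_changing_key_by_prev_cipher('Hello',123,'encrypt')
--     '3V:V9'
--     >>> encrypt_xor_with_changing_key_by_prev_cipher(encrypt_xor_with_changing_key_by_prev_cipher('Hello',123,'encrypt'),123,'decrypt')
--     'Hello'
--     >>> encrypt_xor_with_changing_key_by_prev_cipher(encrypt_xor_with_changing_key_by_prev_cipher('Cryptography',10,'encrypt'),10,'decrypt')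
--     'Cryptography'
--     """
--     if param == 'encrypt':
--         new_text = ""
--         for i in range(len(text)):
--             new_key = ord(text[i]) ^ key
--             new_text += chr(new_key)
--             key = new_key
--         return new_text
--     else:
--         new_text = ""
--         for i in range(len(text)):
--             new_text += chr(ord(text[i]) ^ key)
--             key = ord(text[i])
--         return new_text
-- ===== SOURCE B (Python) =====
-- def encrypt_xor_with_changing_key_by_prev_cipher(text, key, param):
--     if param == 'encrypt':
--         # one pass building the integer cipher-code list, then a single join
--         cipher_codes = []
--         acc = key
--         for ch in text:
--             acc = ord(ch) ^ acc
--             cipher_codes.append(acc)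
--         return ''.join(map(chr, cipher_codes))
--     else:
--         # no true chain: out[i] = text[i] ^ text[i-1], out[0] = text[0] ^ key
--         codes = [ord(ch) for ch in text]
--         prevs = [key] + codes[:-1]
--         return ''.join(chr(o ^ p) for o, p in zip(codes, prevs))
-- ===== Notes on version B (the rewrite author's own statement) =====
-- stated objective: alternative
-- what changed: Encrypt becomes a scan producing the integer cipher-code list joined once; decrypt drops the loop-carried key entirely and XORs each character against a shifted previous-byte list built by zip, instead of per-character string concatenation with a mutable key.
import Mathlib
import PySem

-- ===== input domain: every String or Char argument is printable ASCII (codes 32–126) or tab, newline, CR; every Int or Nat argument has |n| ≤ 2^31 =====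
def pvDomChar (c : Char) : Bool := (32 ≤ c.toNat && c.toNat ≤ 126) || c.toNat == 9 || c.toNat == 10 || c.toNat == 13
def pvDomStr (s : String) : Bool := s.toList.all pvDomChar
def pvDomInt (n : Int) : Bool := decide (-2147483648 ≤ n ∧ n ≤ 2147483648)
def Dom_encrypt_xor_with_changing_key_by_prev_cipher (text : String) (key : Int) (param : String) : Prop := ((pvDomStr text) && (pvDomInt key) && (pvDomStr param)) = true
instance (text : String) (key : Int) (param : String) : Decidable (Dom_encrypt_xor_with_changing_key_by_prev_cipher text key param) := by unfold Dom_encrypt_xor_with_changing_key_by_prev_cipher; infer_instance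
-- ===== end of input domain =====

-- B replaces the mutable running-key loops by a cipher-code scan (encrypt) and a state-free
-- zip against the shifted previous-byte list (decrypt); equivalence is proved on Pre_ below.


-- ===== PORT A =====
-- A's encrypt loop: new_key = ord(text[i]) ^ key; new_text += chr(new_key); key = new_key
def pvAEncLoop : List Char → Int → List Char
  | [], _ => []
  | c :: rest, key =>
      let newKey : Int := PySem.Int.bxor (c.toNat : Int) key
      Char.ofNat newKey.toNat :: pvAEncLoop rest newKey

-- A's decrypt loop: new_text += chr(ord(text[i]) ^ key); key = ord(text[i])
def pvADecLoop : List Char → Int → List Char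
  | [], _ => []
  | c :: rest, key =>
      Char.ofNat ((PySem.Int.bxor (c.toNat : Int) key).toNat) :: pvADecLoop rest ((c.toNat : Int))

def encrypt_xor_with_changing_key_by_prev_cipher (text : String) (key : Int) (param : String) : String :=
  if param == "encrypt" then String.ofList (pvAEncLoop text.toList key)
  else String.ofList (pvADecLoop text.toList key)

-- ===== PORT B =====
-- Source B encrypt: one pass building the integer cipher-code list, then a single join of chr over it
def pvBScan : List Char → Int → List Int
  | [], _ => []
  | c :: rest, acc =>
      let a : Int := PySem.Int.bxor (c.toNat : Int) acc
      a :: pvBScan rest a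

def encrypt_xor_with_changing_key_by_prev_cipher_alt (text : String) (key : Int) (param : String) : String :=
  if param == "encrypt" then
    String.ofList ((pvBScan text.toList key).map (fun n => Char.ofNat n.toNat))
  else
    -- Source B decrypt: codes zipped with prevs = [key] + codes[:-1], no loop-carried state
    let codes : List Int := text.toList.map (fun c => (c.toNat : Int))
    let prevs : List Int := key :: codes.dropLast
    String.ofList ((codes.zip prevs).map (fun p => Char.ofNat (PySem.Int.bxor p.1 p.2).toNat))

-- ===== PRECONDITION & SPEC =====
-- Pre_ excludes (for nonempty text) negative keys and keys > 0x10FFFF, where Python's chr raises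
-- ValueError, and keys in the surrogate block 0xD800–0xDFFF, where A returns a string containing
-- surrogate codepoints that no Lean String can represent.
def Pre_encrypt_xor_with_changing_key_by_prev_cipher (text : String) (key : Int) (param : String) : Prop :=
  text = "" ∨ (0 ≤ key ∧ key ≤ 1114111 ∧ ¬(55296 ≤ key ∧ key ≤ 57343))
instance (text : String) (key : Int) (param : String) : Decidable (Pre_encrypt_xor_with_changing_key_by_prev_cipher text key param) := by unfold Pre_encrypt_xor_with_changing_key_by_prev_cipher; infer_instance

def pvWitness_encrypt_xor_with_changing_key_by_prev_cipher : String × Int × String := ("Hello", 123, "encrypt")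

def Spec_encrypt_xor_with_changing_key_by_prev_cipher (text : String) (key : Int) (param : String) (out : String) : Prop := out = encrypt_xor_with_changing_key_by_prev_cipher_alt text key param
instance (text : String) (key : Int) (param : String) (out : String) : Decidable (Spec_encrypt_xor_with_changing_key_by_prev_cipher text key param out) := by unfold Spec_encrypt_xor_with_changing_key_by_prev_cipher; infer_instance

-- ===== CLAIM (what is proved, stated in full; the proofs are below) =====
def Claim_equal_encrypt_xor_with_changing_key_by_prev_cipher : Prop := ∀ (text : String) (key : Int) (param : String), Dom_encrypt_xor_with_changing_key_by_prev_cipher text key param → Pre_encrypt_xor_with_changing_key_by_prev_cipher text key param → Spec_encrypt_xor_with_changing_key_by_prev_cipher text key param (encrypt_xor_with_changing_key_by_prev_cipher text key param)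

-- ===== LEMMAS AND PROOFS =====
theorem pvEnc_eq (xs : List Char) (k : Int) :
    pvAEncLoop xs k = (pvBScan xs k).map (fun n => Char.ofNat n.toNat) := by
  induction xs generalizing k with
  | nil => simp [pvAEncLoop, pvBScan]
  | cons c rest ih => simp [pvAEncLoop, pvBScan, ih]

theorem pvDec_eq (xs : List Char) (k : Int) :
    pvADecLoop xs k =
      ((xs.map (fun c => ((c.toNat : Int)))).zip
        (k :: (xs.map (fun c => ((c.toNat : Int)))).dropLast)).map
        (fun p => Char.ofNat (PySem.Int.bxor p.1 p.2).toNat) := by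
  induction xs generalizing k with
  | nil => simp [pvADecLoop]
  | cons c rest ih =>
    cases rest with
    | nil => simp [pvADecLoop]
    | cons d rest' =>
      simp only [pvADecLoop, List.map_cons, List.dropLast_cons₂, List.zip_cons_cons] at *
      exact congrArg _ (congrArg _ (List.cons.inj (ih 0)).2)

theorem pvWitness_ok :
    Dom_encrypt_xor_with_changing_key_by_prev_cipher
        pvWitness_encrypt_xor_with_changing_key_by_prev_cipher.1
        pvWitness_encrypt_xor_with_changing_key_by_prev_cipher.2.1
        pvWitness_encrypt_xor_with_changing_key_by_prev_cipher.2.2 ∧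
    Pre_encrypt_xor_with_changing_key_by_prev_cipher
        pvWitness_encrypt_xor_with_changing_key_by_prev_cipher.1
        pvWitness_encrypt_xor_with_changing_key_by_prev_cipher.2.1
        pvWitness_encrypt_xor_with_changing_key_by_prev_cipher.2.2 := by
  decide

-- ===== VERDICT (by name: the statement is the Claim_ definition above) =====
theorem encrypt_xor_with_changing_key_by_prev_cipher_spec : Claim_equal_encrypt_xor_with_changing_key_by_prev_cipher := by
  intro text key param _ _
  unfold Spec_encrypt_xor_with_changing_key_by_prev_cipher
  unfold encrypt_xor_with_changing_key_by_prev_cipher encrypt_xor_with_changing_key_by_prev_cipher_alt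
  by_cases h : param == "encrypt"
  · simp [h, pvEnc_eq]
  · simp [h, pvDec_eq]
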